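-- pv_equiv track=rewrite | github.com/Nanrbet/Mwaghavul-Language-App | PDF Extraction/Mwaghavul csv extracted/English dictionary extraction/mwaghavul converter script.py | process_dic_rows
-- ===== SOURCE A (Python) =====
-- def process_dic_rows(rows):
--     """Process each row to handle word, PoS, and definition extraction from ENGLISH DICTIONARY."""
--     new_rows = []
--     for row in rows:
--         entry = row[0]  # Assuming the data is in the first column
--         word = ""
--         pos = ""
--         definition = ""
--
--         # Extract word, PoS, and definition
--         open_paren_index = entry.find('(')
--         if open_paren_index != -1:
--             word = entry[:open_paren_index].strip()
--
--             close_paren_index = entry.find(')', open_paren_index)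
--             if close_paren_index != -1:
--                 pos = entry[open_paren_index + 1:close_paren_index].strip()
--                 definition = entry[close_paren_index + 1:].strip()
--             else:
--                 definition = entry[open_paren_index + 1:].strip()
--
--         else:
--             word = entry.strip()
--
--         new_rows.append({'Word': word, 'PoS': pos, 'Definition': definition})
--
--     return new_rows
-- ===== SOURCE B (Python) =====
-- def _record(entry):
--     """One left-to-right pass over entry with a 3-state machine:
--     state 0 collects the word, '(' -> state 1 collects the PoS,
--     ')' -> state 2 collects the definition."""
--     state = 0
--     bufs = ['', '', '']
--     for ch in entry:
--         if state == 0 and ch == '(':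
--             state = 1
--         elif state == 1 and ch == ')':
--             state = 2
--         else:
--             bufs[state] += ch
--     if state == 0:
--         return {'Word': bufs[0].strip(), 'PoS': '', 'Definition': ''}
--     if state == 1:
--         # an opening paren with no closing one: everything after '(' is the definition
--         return {'Word': bufs[0].strip(), 'PoS': '', 'Definition': bufs[1].strip()}
--     return {'Word': bufs[0].strip(), 'PoS': bufs[1].strip(), 'Definition': bufs[2].strip()}
--
--
-- def process_dic_rows(rows):
--     return [_record(row[0]) for row in rows]
-- ===== Notes on version B (the rewrite author's own statement) =====
-- stated objective: alternative
-- what changed: Replaces find()/index-slice extraction with a single left-to-right character scan driven by a 3-state machine (word / PoS / definition buffers), so no index arithmetic or substring search remains.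
import Mathlib
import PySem

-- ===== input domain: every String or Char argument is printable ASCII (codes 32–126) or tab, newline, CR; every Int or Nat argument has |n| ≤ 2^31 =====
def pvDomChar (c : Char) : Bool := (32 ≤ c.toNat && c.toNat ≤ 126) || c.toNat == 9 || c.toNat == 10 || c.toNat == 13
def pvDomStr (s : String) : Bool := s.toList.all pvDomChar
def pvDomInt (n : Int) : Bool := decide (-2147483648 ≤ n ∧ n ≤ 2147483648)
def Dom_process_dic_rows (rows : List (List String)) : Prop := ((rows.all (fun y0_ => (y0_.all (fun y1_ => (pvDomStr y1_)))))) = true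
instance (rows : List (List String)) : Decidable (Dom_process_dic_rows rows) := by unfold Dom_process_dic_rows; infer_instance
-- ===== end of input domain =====

-- B replaces the find()/slice extraction with a one-pass 3-state character scan; equivalence proved below.

-- ===== PORT A =====
-- per-row body of A's loop: entry.find('(') / entry.find(')', open) and index slicing
def pvEntryA (entry : String) : List (String × String) :=
  let word : String := ""
  let pos : String := ""
  let definition : String := ""
  let openIdx := PySem.Str.find entry "("
  if openIdx ≠ -1 then
    let word := PySem.Str.strip (PySem.Str.slice entry none (some openIdx))
    let closeIdx := PySem.Str.findFrom entry ")" openIdx none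
    if closeIdx ≠ -1 then
      let pos := PySem.Str.strip (PySem.Str.slice entry (some (openIdx + 1)) (some closeIdx))
      let definition := PySem.Str.strip (PySem.Str.slice entry (some (closeIdx + 1)) none)
      [("Word", word), ("PoS", pos), ("Definition", definition)]
    else
      let definition := PySem.Str.strip (PySem.Str.slice entry (some (openIdx + 1)) none)
      [("Word", word), ("PoS", pos), ("Definition", definition)]
  else
    let word := PySem.Str.strip entry
    [("Word", word), ("PoS", pos), ("Definition", definition)]

def process_dic_rows (rows : List (List String)) : List (List (String × String)) :=
  rows.foldl (fun new_rows row => new_rows ++ [pvEntryA ((PySem.List.pyGet? row 0).getD "")]) []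

-- ===== PORT B =====
-- the body of Source B's per-character if/elif/else: state 0 collects the word,
-- '(' moves to state 1 (PoS buffer), ')' moves to state 2 (definition buffer)
def pvStep (st : Nat × List Char × List Char × List Char) (c : Char) :
    Nat × List Char × List Char × List Char :=
  let (s, b0, b1, b2) := st
  if s = 0 then
    if c = '(' then (1, b0, b1, b2) else (0, b0 ++ [c], b1, b2)
  else if s = 1 then
    if c = ')' then (2, b0, b1, b2) else (1, b0, b1 ++ [c], b2)
  else (s, b0, b1, b2 ++ [c])

-- Source B's _record
def pvRecord (entry : String) : List (String × String) :=
  let (st, b0, b1, b2) := entry.toList.foldl pvStep (0, [], [], [])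
  if st = 0 then
    [("Word", String.ofList (PySem.Chars.strip b0)), ("PoS", ""), ("Definition", "")]
  else if st = 1 then
    [("Word", String.ofList (PySem.Chars.strip b0)), ("PoS", ""),
     ("Definition", String.ofList (PySem.Chars.strip b1))]
  else
    [("Word", String.ofList (PySem.Chars.strip b0)),
     ("PoS", String.ofList (PySem.Chars.strip b1)),
     ("Definition", String.ofList (PySem.Chars.strip b2))]

def process_dic_rows_alt (rows : List (List String)) : List (List (String × String)) :=
  rows.map (fun row =>
    match PySem.List.pyGet? row 0 with
    | some entry => pvRecord entry
    | none => [])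

-- ===== PRECONDITION & SPEC =====
-- Pre_ excludes only inputs on which A raises: a row with no column makes row[0] an IndexError.
def Pre_process_dic_rows (rows : List (List String)) : Prop := ∀ row ∈ rows, row ≠ []
instance (rows : List (List String)) : Decidable (Pre_process_dic_rows rows) := by
  unfold Pre_process_dic_rows; infer_instance
def pvWitness_process_dic_rows : List (List String) := [["cat (n) an animal"], ["dog"]]
def Spec_process_dic_rows (rows : List (List String)) (out : List (List (String × String))) : Prop := out = process_dic_rows_alt rows
instance (rows : List (List String)) (out : List (List (String × String))) : Decidable (Spec_process_dic_rows rows out) := by unfold Spec_process_dic_rows; infer_instance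

-- ===== CLAIM (what is proved, stated in full; the proofs are below) =====
def Claim_equal_process_dic_rows : Prop := ∀ (rows : List (List String)), Dom_process_dic_rows rows → Pre_process_dic_rows rows → Spec_process_dic_rows rows (process_dic_rows rows)

-- ===== LEMMAS AND PROOFS =====

theorem pv_singleton_prefix_drop (s : List Char) (c : Char) (i : Nat) :
    [c] <+: s.drop i ↔ s[i]? = some c := by
  rw [← List.head?_drop]
  cases s.drop i <;> simp [List.cons_prefix_cons, eq_comm]

-- Python's s.find(c) for a one-character needle, characterised by List.findIdx
theorem pv_find_single (s : List Char) (c : Char) :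
    PySem.Chars.find s [c] = if c ∈ s then ((s.findIdx (· == c) : Nat) : Int) else -1 := by
  by_cases h : c ∈ s
  · have hne : PySem.Chars.find s [c] ≠ -1 := by
      rw [PySem.Chars.find_ne_neg_one_iff]
      obtain ⟨l1, l2, rfl⟩ := List.append_of_mem h
      exact ⟨l1, l2, by simp⟩
    have hlb := PySem.Chars.neg_one_le_find s [c]
    have hnn : 0 ≤ PySem.Chars.find s [c] := by omega
    obtain ⟨hpre, hmin⟩ := PySem.Chars.find_spec hnn
    rw [pv_singleton_prefix_drop] at hpre
    set N := (PySem.Chars.find s [c]).toNat with hN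
    have hNlt : N < s.length := by
      by_contra hcon
      rw [List.getElem?_eq_none (by omega)] at hpre
      simp at hpre
    have hF : s.findIdx (· == c) < s.length :=
      List.findIdx_lt_length_of_exists ⟨c, h, by simp⟩
    have h1 : s.findIdx (· == c) ≤ N := by
      by_contra hcon
      have := List.not_of_lt_findIdx (p := (· == c)) (xs := s) (i := N) (by omega)
      rw [List.getElem?_eq_getElem hNlt] at hpre
      simp at this hpre
      exact this hpre
    have h2 : N ≤ s.findIdx (· == c) := by
      by_contra hcon
      have hget : s[s.findIdx (· == c)] = c := by
        have := List.findIdx_getElem (p := (· == c)) (xs := s) (w := hF)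
        simpa using this
      have := hmin (s.findIdx (· == c)) (by omega)
      rw [pv_singleton_prefix_drop] at this
      exact this (by rw [List.getElem?_eq_getElem hF, hget])
    have : N = s.findIdx (· == c) := by omega
    rw [if_pos h, ← this, hN, Int.toNat_of_nonneg hnn]
  · rw [if_neg h, PySem.Chars.find_eq_neg_one_iff]
    intro hinf
    exact h (hinf.sublist.subset (by simp))

theorem pv_find_cons_ne (a c : Char) (h : a ≠ c) (l : List Char) :
    PySem.Chars.find (a :: l) [c]
      = if PySem.Chars.find l [c] = -1 then -1 else 1 + PySem.Chars.find l [c] := by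
  rw [pv_find_single, pv_find_single]
  by_cases hc : c ∈ l
  · rw [if_pos hc, if_pos (by simpa using Or.inr hc : c ∈ a :: l)]
    rw [List.findIdx_cons]
    simp [(by simp [h] : (a == c) = false)]
    omega
  · have hmemc : c ∉ a :: l := by
      intro hm
      rcases List.mem_cons.mp hm with e | e
      · exact h e.symm
      · exact hc e
    rw [if_neg hc, if_neg hmemc, if_pos rfl]

theorem pv_strip_slice (x : String) (a b : Option Int) :
    PySem.Str.strip (PySem.Str.slice x a b)
      = String.ofList (PySem.Chars.strip (PySem.List.slice x.toList a b)) := by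
  show String.ofList (PySem.Chars.strip (String.ofList (PySem.List.slice x.toList a b)).toList) = _
  rw [String.toList_ofList]

-- the state machine in state 2 just appends every character to the definition buffer
theorem pv_fold2 (s : List Char) (b0 b1 b2 : List Char) :
    s.foldl pvStep (2, b0, b1, b2) = (2, b0, b1, b2 ++ s) := by
  induction s generalizing b2 with
  | nil => simp
  | cons a t ih => simp [pvStep, ih]

-- from state 1 the machine buffers up to the first ')', then hands the rest to state 2
theorem pv_fold1 (s : List Char) (b0 b1 : List Char) :
    s.foldl pvStep (1, b0, b1, []) =
      if ')' ∈ s then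
        (2, b0, b1 ++ s.take (s.findIdx (· == ')')), s.drop (s.findIdx (· == ')') + 1))
      else (1, b0, b1 ++ s, []) := by
  induction s generalizing b1 with
  | nil => simp
  | cons a t ih =>
    by_cases ha : a = ')'
    · subst ha
      have hstep : pvStep (1, b0, b1, []) ')' = (2, b0, b1, []) := by simp [pvStep]
      rw [List.foldl_cons, hstep, pv_fold2, if_pos (by simp), List.findIdx_cons]
      simp
    · have hstep : pvStep (1, b0, b1, []) a = (1, b0, b1 ++ [a], []) := by simp [pvStep, ha]
      rw [List.foldl_cons, hstep, ih (b1 ++ [a]), List.findIdx_cons]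
      simp only [(by simp [ha] : (a == ')') = false), cond_false]
      by_cases hm : ')' ∈ t
      · rw [if_pos hm, if_pos (by simp [hm])]
        simp
      · rw [if_neg hm, if_neg (by simp [hm]; exact fun h => ha h.symm)]
        simp

-- from state 0 the machine buffers up to the first '(', then continues in state 1
theorem pv_fold0 (s : List Char) (b0 : List Char) :
    s.foldl pvStep (0, b0, [], []) =
      if '(' ∈ s then
        (s.drop (s.findIdx (· == '(') + 1)).foldl pvStep
          (1, b0 ++ s.take (s.findIdx (· == '(')), [], [])
      else (0, b0 ++ s, [], []) := by
  induction s generalizing b0 with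
  | nil => simp
  | cons a t ih =>
    by_cases ha : a = '('
    · subst ha
      have hstep : pvStep (0, b0, [], []) '(' = (1, b0, [], []) := by simp [pvStep]
      rw [List.foldl_cons, hstep, if_pos (by simp), List.findIdx_cons]
      simp
    · have hstep : pvStep (0, b0, [], []) a = (0, b0 ++ [a], [], []) := by simp [pvStep, ha]
      rw [List.foldl_cons, hstep, ih (b0 ++ [a]), List.findIdx_cons]
      simp only [(by simp [ha] : (a == '(') = false), cond_false]
      by_cases hm : '(' ∈ t
      · rw [if_pos hm, if_pos (by simp [hm])]
        simp
      · rw [if_neg hm, if_neg (by simp [hm]; exact fun h => ha h.symm)]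
        simp

-- the per-entry equality: A's find/slice extraction equals B's one-pass state machine
theorem pv_entry_eq (entry : String) : pvEntryA entry = pvRecord entry := by
  by_cases hmem : '(' ∈ entry.toList
  case neg =>
    have hfind : PySem.Chars.find entry.toList ['('] = -1 := by
      rw [pv_find_single]
      simp [hmem]
    have hfold : entry.toList.foldl pvStep (0, [], [], []) = (0, entry.toList, [], []) := by
      rw [pv_fold0, if_neg hmem]
      simp
    simp [pvEntryA, pvRecord, hfind, hfold, PySem.Str.strip]
  case pos =>
    have hM1lt : entry.toList.findIdx (· == '(') < entry.toList.length :=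
      List.findIdx_lt_length_of_exists ⟨'(', hmem, by simp⟩
    set M1 := entry.toList.findIdx (· == '(') with hM1def
    have hM1get : entry.toList[M1]'hM1lt = '(' := by
      have := List.findIdx_getElem (p := (· == '(')) (xs := entry.toList) (w := hM1lt)
      simpa using this
    have hfind : PySem.Str.find entry "(" = (M1 : Int) := by
      show PySem.Chars.find entry.toList ("(" : String).toList = _
      rw [(by simp : ("(" : String).toList = ['(']), pv_find_single, if_pos hmem]
    have hdrop : entry.toList.drop M1 = '(' :: entry.toList.drop (M1 + 1) := by
      rw [List.drop_eq_getElem_cons hM1lt, hM1get]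
    have hfold0 : entry.toList.foldl pvStep (0, [], [], []) =
        (entry.toList.drop (M1 + 1)).foldl pvStep (1, entry.toList.take M1, [], []) := by
      rw [pv_fold0, if_pos hmem, ← hM1def]
      simp
    have hffrom : PySem.Str.findFrom entry ")" ((M1 : Int)) none
        = if PySem.Chars.find (entry.toList.drop (M1 + 1)) [')'] = -1 then -1
          else (M1 : Int) + 1 + PySem.Chars.find (entry.toList.drop (M1 + 1)) [')'] := by
      show PySem.Chars.findFrom entry.toList (")" : String).toList ((M1 : Int)) none = _
      rw [(by simp : (")" : String).toList = [')']),
        PySem.Chars.findFrom_natCast entry.toList [')'] M1 (le_of_lt hM1lt), hdrop,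
        pv_find_cons_ne '(' ')' (by decide) _]
      by_cases hcf : PySem.Chars.find (entry.toList.drop (M1 + 1)) [')'] = -1
      · simp [hcf]
      · rw [if_neg hcf, if_neg (by have := PySem.Chars.neg_one_le_find (entry.toList.drop (M1+1)) [')']; omega),
          if_neg hcf]
        ring
    by_cases hc : ')' ∈ entry.toList.drop (M1 + 1)
    case neg =>
      have hcf : PySem.Chars.find (entry.toList.drop (M1 + 1)) [')'] = -1 := by
        rw [pv_find_single, if_neg hc]
      have hff : PySem.Str.findFrom entry ")" ((M1 : Int)) none = -1 := by
        rw [hffrom, if_pos hcf]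
      have hfold : entry.toList.foldl pvStep (0, [], [], []) =
          (1, entry.toList.take M1, entry.toList.drop (M1 + 1), []) := by
        rw [hfold0, pv_fold1, if_neg hc]
        simp
      have hs0 : PySem.Str.strip (PySem.Str.slice entry none (some ((M1 : Nat) : Int)))
          = String.ofList (PySem.Chars.strip (entry.toList.take M1)) := by
        rw [pv_strip_slice, PySem.List.slice_to_natCast]
      have hs1 : PySem.Str.strip (PySem.Str.slice entry (some ((M1 : Int) + 1)) none)
          = String.ofList (PySem.Chars.strip (entry.toList.drop (M1 + 1))) := by
        rw [pv_strip_slice, (by push_cast; ring : (M1 : Int) + 1 = ((M1 + 1 : Nat) : Int)),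
          PySem.List.slice_from_natCast]
      simp only [pvEntryA, pvRecord, hfind, hfold, hff, hs0, hs1]
      norm_num
      intro h
      exact absurd h (by omega)
    case pos =>
      have hM2lt : (entry.toList.drop (M1 + 1)).findIdx (· == ')')
          < (entry.toList.drop (M1 + 1)).length :=
        List.findIdx_lt_length_of_exists ⟨')', hc, by simp⟩
      set M2 := (entry.toList.drop (M1 + 1)).findIdx (· == ')') with hM2def
      have hcf : PySem.Chars.find (entry.toList.drop (M1 + 1)) [')'] = (M2 : Int) := by
        rw [pv_find_single, if_pos hc]
      have hff : PySem.Str.findFrom entry ")" ((M1 : Int)) none = ((M1 + 1 + M2 : Nat) : Int) := by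
        rw [hffrom, hcf, if_neg (by omega)]
        push_cast; ring
      have hfold : entry.toList.foldl pvStep (0, [], [], []) =
          (2, entry.toList.take M1, (entry.toList.drop (M1 + 1)).take M2,
           (entry.toList.drop (M1 + 1)).drop (M2 + 1)) := by
        rw [hfold0, pv_fold1, if_pos hc, ← hM2def]
        simp
      have hs0 : PySem.Str.strip (PySem.Str.slice entry none (some ((M1 : Nat) : Int)))
          = String.ofList (PySem.Chars.strip (entry.toList.take M1)) := by
        rw [pv_strip_slice, PySem.List.slice_to_natCast]
      have hs2 : PySem.Str.strip (PySem.Str.slice entry (some ((M1 : Int) + 1)) (some ((M1 + 1 + M2 : Nat) : Int)))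
          = String.ofList (PySem.Chars.strip ((entry.toList.drop (M1 + 1)).take M2)) := by
        rw [pv_strip_slice, (by push_cast; ring : (M1 : Int) + 1 = ((M1 + 1 : Nat) : Int)),
          (by push_cast; ring : ((M1 + 1 + M2 : Nat) : Int) = ((M1 + 1 : Nat) : Int) + ((M2 : Nat) : Int)),
          PySem.List.slice_natCast_add]
      have hs3 : PySem.Str.strip (PySem.Str.slice entry (some (((M1 + 1 + M2 : Nat) : Int) + 1)) none)
          = String.ofList (PySem.Chars.strip ((entry.toList.drop (M1 + 1)).drop (M2 + 1))) := by
        rw [pv_strip_slice,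
          (by push_cast; ring : ((M1 + 1 + M2 : Nat) : Int) + 1 = ((M1 + 1 + M2 + 1 : Nat) : Int)),
          PySem.List.slice_from_natCast,
          (by omega : M1 + 1 + M2 + 1 = (M1 + 1) + (M2 + 1)), ← List.drop_drop]
      simp only [pvEntryA, pvRecord, hfind, hfold, hff, hs0, hs2, hs3]
      norm_num
      rw [if_neg (by push_cast; omega : ¬ ((M1 : Int) + 1 + (M2 : Int) = -1)),
        if_neg (by omega : ¬ ((M1 : Int) = -1))]

-- lift the per-entry equality over the two loop shapes (foldl-append vs map)
theorem pv_fold_map (rows : List (List String)) (acc : List (List (String × String)))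
    (h : ∀ row ∈ rows, row ≠ []) :
    rows.foldl (fun new_rows row => new_rows ++ [pvEntryA ((PySem.List.pyGet? row 0).getD "")]) acc
      = acc ++ rows.map (fun row =>
          match PySem.List.pyGet? row 0 with
          | some entry => pvRecord entry
          | none => []) := by
  induction rows generalizing acc with
  | nil => simp
  | cons r t ih =>
    have hr : r ≠ [] := h r (by simp)
    obtain ⟨a, r', rfl⟩ := List.exists_cons_of_ne_nil hr
    have hget : PySem.List.pyGet? (a :: r') (0 : Int) = some a := by
      simp [PySem.List.pyGet?, PySem.List.pyIdx?]
    rw [List.foldl_cons, ih _ (fun row hrow => h row (by simp [hrow])), List.map_cons, hget]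
    simp [pv_entry_eq]

-- ===== VERDICT (by name: the statement is the Claim_ definition above) =====
theorem process_dic_rows_spec : Claim_equal_process_dic_rows := by
  intro rows _ hpre
  unfold Spec_process_dic_rows process_dic_rows process_dic_rows_alt
  simpa using pv_fold_map rows [] hpre
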